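-- pv_equiv track=rewrite | github.com/otman-sss/curso_python | curso_ds4/frases_celebres/busqueda.py | buscar_palabras
-- ===== SOURCE A (Python) =====
-- def buscar_palabras(frases, palabras):
--     '''Busca en una lista de palabras en una lista de frases'''
--     frases_encontradas = []
--     for frase in frases:
--         for palabra in palabras:
--             if palabra.lower() in frase.lower():
--                 frases_encontradas.append(frase)
--                 break
--     return frases_encontradas
-- ===== SOURCE B (Python) =====
-- def buscar_palabras(frases, palabras):
--     '''Busca en una lista de palabras en una lista de frases'''
--     lowered = [f.lower() for f in frases]
--     matched = [False] * len(frases)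
--     for palabra in palabras:
--         w = palabra.lower()
--         matched = [m or (w in fl) for m, fl in zip(matched, lowered)]
--     return [f for f, m in zip(frases, matched) if m]
-- ===== Notes on version B (the rewrite author's own statement) =====
-- stated objective: alternative
-- what changed: Inverts the traversal: B is word-major, sweeping a boolean match mask over all (pre-lowered) phrases once per word and finally emitting the phrases whose mask bit is set, instead of A's phrase-major nested scan with an early break and an accumulator.
import Mathlib
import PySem

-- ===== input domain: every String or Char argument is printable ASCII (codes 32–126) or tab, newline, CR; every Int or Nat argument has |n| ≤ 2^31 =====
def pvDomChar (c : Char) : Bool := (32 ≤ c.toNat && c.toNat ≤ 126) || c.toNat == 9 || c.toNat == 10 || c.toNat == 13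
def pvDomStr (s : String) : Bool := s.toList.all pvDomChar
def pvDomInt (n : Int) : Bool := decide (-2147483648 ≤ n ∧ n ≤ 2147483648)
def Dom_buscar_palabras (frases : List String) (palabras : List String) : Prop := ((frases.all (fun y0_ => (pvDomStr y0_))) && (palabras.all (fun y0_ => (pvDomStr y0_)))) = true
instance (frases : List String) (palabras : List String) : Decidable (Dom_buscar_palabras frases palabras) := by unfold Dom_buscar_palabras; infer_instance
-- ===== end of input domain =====

-- B inverts the traversal: a word-major pass updating a boolean match mask over
-- pre-lowered phrases, then emitting the masked phrases — vs A's phrase-major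
-- nested scan with break (objective: alternative; same asymptotic cost).


-- ===== PORT A =====
-- inner 'for palabra in palabras: if …: append; break' — scan returning whether to append
def buscar_palabras_hitA (frase : String) : List String → Bool
  | [] => false
  | palabra :: rest =>
    if PySem.Str.isIn (PySem.Str.lower palabra) (PySem.Str.lower frase) then true
    else buscar_palabras_hitA frase rest

def buscar_palabras (frases : List String) (palabras : List String) : List String :=
  frases.foldl (fun acc frase =>
    if buscar_palabras_hitA frase palabras then acc ++ [frase] else acc) []

-- ===== PORT B =====
def buscar_palabras_alt (frases : List String) (palabras : List String) : List String :=
  let lowered := frases.map PySem.Str.lower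
  let matched := palabras.foldl
    (fun matched palabra =>
      let w := PySem.Str.lower palabra
      (matched.zip lowered).map (fun p => p.1 || PySem.Str.isIn w p.2))
    (List.replicate frases.length false)
  ((frases.zip matched).filter (fun p => p.2)).map (fun p => p.1)

-- ===== PRECONDITION & SPEC =====
def Spec_buscar_palabras (frases : List String) (palabras : List String) (out : List String) : Prop := out = buscar_palabras_alt frases palabras
instance (frases : List String) (palabras : List String) (out : List String) : Decidable (Spec_buscar_palabras frases palabras out) := by unfold Spec_buscar_palabras; infer_instance

-- ===== CLAIM (what is proved, stated in full; the proofs are below) =====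
def Claim_equal_buscar_palabras : Prop := ∀ (frases : List String) (palabras : List String), Dom_buscar_palabras frases palabras → Spec_buscar_palabras frases palabras (buscar_palabras frases palabras)

-- ===== LEMMAS AND PROOFS =====
theorem hitA_eq_any (frase : String) (palabras : List String) :
    buscar_palabras_hitA frase palabras
      = palabras.any (fun p => PySem.Str.isIn (PySem.Str.lower p) (PySem.Str.lower frase)) := by
  induction palabras with
  | nil => rfl
  | cons p rest ih =>
    simp only [buscar_palabras_hitA, List.any_cons, ih]
    cases h : PySem.Str.isIn (PySem.Str.lower p) (PySem.Str.lower frase) <;> simp [h]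

-- one mask-update step is a zipWith
theorem step_eq_zipWith (f : Bool → String → Bool) (m : List Bool) (l : List String) :
    ((m.zip l).map (fun p => f p.1 p.2)) = List.zipWith f m l := by
  induction m generalizing l with
  | nil => simp
  | cons a m ih => cases l <;> simp [ih]

theorem zipWith_zipWith_left (f g : Bool → String → Bool) (m : List Bool) (l : List String) :
    List.zipWith f (List.zipWith g m l) l = List.zipWith (fun a x => f (g a x) x) m l := by
  induction m generalizing l with
  | nil => simp
  | cons a m ih => cases l <;> simp [ih]

theorem zipWith_id_left (m : List Bool) (l : List String) (h : m.length ≤ l.length) :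
    List.zipWith (fun a (_ : String) => a) m l = m := by
  induction m generalizing l with
  | nil => simp
  | cons a m ih =>
    cases l with
    | nil => simp at h
    | cons x l => simp_all

-- the word-major fold computes, at each position, the OR over all words
theorem fold_mask (ws : List String) (m : List Bool) (l : List String)
    (h : m.length ≤ l.length) :
    ws.foldl
      (fun matched palabra =>
        ((matched.zip l).map
          (fun p => p.1 || PySem.Str.isIn (PySem.Str.lower palabra) p.2)))
      m
    = List.zipWith
        (fun a fl => a || ws.any (fun p => PySem.Str.isIn (PySem.Str.lower p) fl)) m l := by
  induction ws generalizing m with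
  | nil => simpa using (zipWith_id_left m l h).symm
  | cons w ws ih =>
    simp only [List.foldl_cons]
    rw [step_eq_zipWith (fun a fl => a || PySem.Str.isIn (PySem.Str.lower w) fl) m l]
    rw [ih _ (by simp)]
    rw [zipWith_zipWith_left]
    simp [Bool.or_assoc]

theorem zipWith_or_replicate_map (g : String → Bool) (xs : List String) :
    List.zipWith (fun a fl => a || g fl) (List.replicate xs.length false) (xs.map PySem.Str.lower)
      = xs.map (fun x => g (PySem.Str.lower x)) := by
  induction xs with
  | nil => rfl
  | cons x xs ih => simp [List.replicate_succ, ih]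

theorem zip_map_filter (xs : List String) (p : String → Bool) :
    (((xs.zip (xs.map p)).filter (fun q => q.2)).map (fun q => q.1)) = xs.filter p := by
  induction xs with
  | nil => rfl
  | cons x xs ih =>
    cases h : p x <;> simp [h, ih]

-- ===== VERDICT (by name: the statement is the Claim_ definition above) =====
theorem buscar_palabras_spec : Claim_equal_buscar_palabras := by
  intro frases palabras _
  unfold Spec_buscar_palabras buscar_palabras buscar_palabras_alt
  rw [PySem.List.foldl_append_if_eq_filter]
  simp only [List.nil_append,
    fold_mask palabras (List.replicate frases.length false) (frases.map PySem.Str.lower)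
      (by simp),
    zipWith_or_replicate_map, zip_map_filter, hitA_eq_any]
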